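-- pv_equiv track=rewrite | github.com/deDSeC00720/advent-of-code-2023 | day5.py | process_range
-- ===== SOURCE A (Python) =====
-- def process_range(next_range, map_range):
--     processed = []
--     unprocessed = []
--     for i in range(0, len(next_range), 2):
--         start = next_range[i]
--         length = next_range[i + 1]
--
--         if start >= map_range[1] + map_range[2] or start + length - 1 < map_range[1]:
--             unprocessed.extend([start, length])
--             continue
--
--         if start >= map_range[1] and start + length <= map_range[1] + map_range[2]:
--             processed.extend([map_range[0] + start - map_range[1], length])
--             continue
--
--         if start >= map_range[1]:
--             processed.extend([map_range[0] + start - map_range[1], map_range[1] + map_range[2] - start])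
--             unprocessed.extend([map_range[1] + map_range[2], start + length - map_range[1] - map_range[2]])
--             continue
--
--         if start + length - 1 < map_range[1] + map_range[2]:
--             processed.extend([map_range[0], start + length - map_range[1]])
--             unprocessed.extend([start, map_range[1] - start])
--             continue
--
--         unprocessed.extend([start, map_range[1] - start, map_range[1] + map_range[2], start + length - map_range[1] - map_range[2]])
--         processed.extend([map_range[0], map_range[2]])
--
--     return processed, unprocessed
-- ===== SOURCE B (Python) =====
-- def _mapped(pair, m):
--     # the part of [x, x+y) inside the map's source window, shifted to dest
--     (x, y), d, s, L = pair, m[0], m[1], m[2]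
--     if x >= s + L or x + y <= s:
--         return []
--     lo, hi = max(x, s), min(x + y, s + L)
--     return [d + lo - s, hi - lo]
--
--
-- def _leftover(pair, m):
--     # the parts of [x, x+y) outside the map's source window, kept as-is
--     (x, y), s, L = pair, m[1], m[2]
--     if x >= s + L or x + y <= s:
--         return [x, y]
--     return ([x, s - x] if x < s else []) + ([s + L, x + y - s - L] if x + y > s + L else [])
--
--
-- def process_range(next_range, map_range):
--     # Two staged passes over the (start, length) pairs: one pass collects the
--     # remapped pieces, a second pass collects the unmapped leftovers.
--     it = iter(next_range)
--     pairs = list(zip(it, it))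
--     processed = [v for p in pairs for v in _mapped(p, map_range)]
--     unprocessed = [v for p in pairs for v in _leftover(p, map_range)]
--     return processed, unprocessed
-- ===== Notes on version B (the rewrite author's own statement) =====
-- stated objective: alternative
-- what changed: B makes two staged passes over the (start, length) pairs — one comprehension collecting each pair's clipped-and-shifted mapped piece via max/min interval clipping, a second collecting its outside leftovers — instead of A's single indexed accumulator loop with a five-way positional case analysis extending both lists at once.
import Mathlib
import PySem

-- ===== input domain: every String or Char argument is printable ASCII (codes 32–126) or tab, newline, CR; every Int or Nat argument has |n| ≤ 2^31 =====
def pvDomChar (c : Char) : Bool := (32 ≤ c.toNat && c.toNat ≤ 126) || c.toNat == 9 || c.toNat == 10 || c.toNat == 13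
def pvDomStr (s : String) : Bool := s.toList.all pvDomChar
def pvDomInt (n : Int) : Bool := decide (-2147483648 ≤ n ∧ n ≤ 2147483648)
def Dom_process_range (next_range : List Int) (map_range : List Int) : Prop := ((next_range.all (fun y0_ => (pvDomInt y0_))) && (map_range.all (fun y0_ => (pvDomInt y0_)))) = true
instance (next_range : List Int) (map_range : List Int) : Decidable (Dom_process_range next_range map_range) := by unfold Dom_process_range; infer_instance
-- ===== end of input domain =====

-- B replaces A's single five-branch accumulator loop by two staged passes over
-- the (start, length) pairs — one collecting the clipped-and-shifted mapped
-- pieces, one collecting the outside leftovers (objective: alternative).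

-- ===== PORT A =====
-- loop body of A's 'for i in range(0, len(next_range), 2)'; Pre_ guarantees
-- every pyGetD index is in range in Python, so the default 0 is never A's value
def pvABody (next_range : List Int) (map_range : List Int)
    (st : List Int × List Int) (i : Int) : List Int × List Int :=
  let start := PySem.List.pyGetD next_range i 0
  let length := PySem.List.pyGetD next_range (i + 1) 0
  let m0 := PySem.List.pyGetD map_range 0 0
  let m1 := PySem.List.pyGetD map_range 1 0
  let m2 := PySem.List.pyGetD map_range 2 0
  if start ≥ m1 + m2 ∨ start + length - 1 < m1 then
    (st.1, st.2 ++ [start, length])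
  else if start ≥ m1 ∧ start + length ≤ m1 + m2 then
    (st.1 ++ [m0 + start - m1, length], st.2)
  else if start ≥ m1 then
    (st.1 ++ [m0 + start - m1, m1 + m2 - start], st.2 ++ [m1 + m2, start + length - m1 - m2])
  else if start + length - 1 < m1 + m2 then
    (st.1 ++ [m0, start + length - m1], st.2 ++ [start, m1 - start])
  else
    (st.1 ++ [m0, m2], st.2 ++ [start, m1 - start, m1 + m2, start + length - m1 - m2])

def process_range (next_range : List Int) (map_range : List Int) : List Int × List Int :=
  (PySem.List.pyRange 0 (PySem.List.len next_range) 2).foldl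
    (pvABody next_range map_range) ([], [])

-- ===== PORT B =====
-- Source B's 'zip(it, it)': consume the list two at a time into (start, length)
-- pairs (an odd tail is dropped by zip; Pre_ excludes odd lengths anyway)
def pvPairs : List Int → List (Int × Int)
  | a :: b :: rest => (a, b) :: pvPairs rest
  | _ => []

-- Source B's _mapped: the part of [x, x+y) inside the map's source window, shifted
-- (map_range[i] raises in Python on short lists; Pre_ keeps the indices in
-- range, so pyGetD's default 0 is never B's value)
def pvMapped (m : List Int) (p : Int × Int) : List Int :=
  let d := PySem.List.pyGetD m 0 0
  let s := PySem.List.pyGetD m 1 0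
  let L := PySem.List.pyGetD m 2 0
  if p.1 ≥ s + L ∨ p.1 + p.2 ≤ s then []
  else
    let lo := max p.1 s
    let hi := min (p.1 + p.2) (s + L)
    [d + lo - s, hi - lo]

-- Source B's _leftover: the parts of [x, x+y) outside the source window, as-is
def pvLeftover (m : List Int) (p : Int × Int) : List Int :=
  let s := PySem.List.pyGetD m 1 0
  let L := PySem.List.pyGetD m 2 0
  if p.1 ≥ s + L ∨ p.1 + p.2 ≤ s then [p.1, p.2]
  else
    (if p.1 < s then [p.1, s - p.1] else []) ++
      (if p.1 + p.2 > s + L then [s + L, p.1 + p.2 - s - L] else [])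

def process_range_alt (next_range : List Int) (map_range : List Int) : List Int × List Int :=
  ((pvPairs next_range).flatMap (pvMapped map_range),
   (pvPairs next_range).flatMap (pvLeftover map_range))

-- ===== PRECONDITION & SPEC =====
-- Pre_ excludes exactly the inputs where Python A raises IndexError: an
-- odd-length next_range (next_range[i+1] on the last pair) or, when the loop
-- runs at all, a map_range shorter than 3 (map_range[1]/[2]).
def Pre_process_range (next_range : List Int) (map_range : List Int) : Prop :=
  next_range.length % 2 = 0 ∧ (next_range ≠ [] → 3 ≤ map_range.length)
instance (next_range : List Int) (map_range : List Int) : Decidable (Pre_process_range next_range map_range) := by unfold Pre_process_range; infer_instance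
def pvWitness_process_range : List Int × List Int := ([79, 14, 55, 13], [52, 50, 48])

def Spec_process_range (next_range : List Int) (map_range : List Int) (out : List Int × List Int) : Prop := out = process_range_alt next_range map_range
instance (next_range : List Int) (map_range : List Int) (out : List Int × List Int) : Decidable (Spec_process_range next_range map_range out) := by unfold Spec_process_range; infer_instance

-- ===== CLAIM (what is proved, stated in full; the proofs are below) =====
def Claim_equal_process_range : Prop := ∀ (next_range : List Int) (map_range : List Int), Dom_process_range next_range map_range → Pre_process_range next_range map_range → Spec_process_range next_range map_range (process_range next_range map_range)

-- ===== LEMMAS AND PROOFS =====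

-- range(0, n+2, 2) peels its head, the tail being range(0, n, 2) shifted by 2
lemma pvPyRange_two_shift (n : Nat) :
    PySem.List.pyRange 0 ((n + 2 : Nat) : Int) 2 =
      0 :: (PySem.List.pyRange 0 ((n : Nat) : Int) 2).map (· + 2) := by
  rw [PySem.List.pyRange_of_pos _ _ (by norm_num), PySem.List.pyRange_of_pos _ _ (by norm_num)]
  have e1 : (if (0 : Int) < ((n + 2 : Nat) : Int) then ((((n + 2 : Nat) : Int) - 0 + 2 - 1) / 2).toNat else 0) = (n + 1) / 2 + 1 := by
    split <;> omega
  have e2 : (if (0 : Int) < ((n : Nat) : Int) then ((((n : Nat) : Int) - 0 + 2 - 1) / 2).toNat else 0) = (n + 1) / 2 := by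
    split <;> omega
  rw [e1, e2, List.range_succ_eq_map, List.map_cons, List.map_map, List.map_map]
  refine List.cons_eq_cons.mpr ⟨by norm_num, ?_⟩
  apply List.map_congr_left
  intro a _
  simp [Function.comp]
  ring

-- shifting the index by 2 matches dropping two list elements (any nonneg index)
lemma pvGetD_shift2 (x y : Int) (xs : List Int) (i : Int) (hi : 0 ≤ i) (d : Int) :
    PySem.List.pyGetD (x :: y :: xs) (i + 2) d = PySem.List.pyGetD xs i d := by
  obtain ⟨k, rfl⟩ : ∃ k : Nat, i = (k : Int) := ⟨i.toNat, by omega⟩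
  have : (k : Int) + 2 = ((k + 2 : Nat) : Int) := by push_cast; ring
  rw [this, PySem.List.pyGetD_natCast, PySem.List.pyGetD_natCast]
  rfl

-- per-pair agreement: A's five-branch body at the head index appends exactly
-- B's mapped piece and B's leftovers for that pair
lemma pvStepEq (mr rest : List Int) (x y : Int) (st : List Int × List Int) :
    pvABody (x :: y :: rest) mr st 0 =
      (st.1 ++ pvMapped mr (x, y), st.2 ++ pvLeftover mr (x, y)) := by
  obtain ⟨p, u⟩ := st
  unfold pvABody pvMapped pvLeftover
  simp only [show ((0 : Int) + 1) = ((1 : Nat) : Int) by norm_num, PySem.List.pyGetD_natCast,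
    PySem.List.pyGetD_zero_cons, List.getD_cons_succ, List.getD_cons_zero]
  split_ifs
  all_goals first
    | (exfalso; omega)
    | (congr 1 <;> simp <;> omega)

-- main loop invariant: A's indexed stride-2 fold appends, to either component
-- of the accumulator, exactly B's corresponding staged pass over the pairs
lemma pvMain (mr : List Int) : ∀ (xs : List Int), xs.length % 2 = 0 →
    ∀ (st : List Int × List Int),
      (PySem.List.pyRange 0 (PySem.List.len xs) 2).foldl (pvABody xs mr) st =
        (st.1 ++ (pvPairs xs).flatMap (pvMapped mr),
         st.2 ++ (pvPairs xs).flatMap (pvLeftover mr))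
  | [], _, st => by
    simp [PySem.List.len_eq, PySem.List.pyRange_of_pos 0 0 (by norm_num : (0:Int) < 2), pvPairs]
  | [x], h, st => by simp at h
  | x :: y :: rest, h, st => by
    have hlen : PySem.List.len (x :: y :: rest) = ((rest.length + 2 : Nat) : Int) := by
      simp [PySem.List.len_eq]; ring
    rw [hlen, pvPyRange_two_shift, List.foldl_cons, List.foldl_map]
    have hcong : ∀ (acc : List Int × List Int), ∀ i ∈ PySem.List.pyRange 0 ((rest.length : Nat) : Int) 2,
        pvABody (x :: y :: rest) mr acc (i + 2) = pvABody rest mr acc i := by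
      intro acc i hi
      have hi0 : 0 ≤ i := ((PySem.List.mem_pyRange_iff_of_pos (by norm_num) i).mp hi).1
      unfold pvABody
      rw [pvGetD_shift2 x y rest i hi0, show i + 2 + 1 = (i + 1) + 2 by ring,
        pvGetD_shift2 x y rest (i + 1) (by omega)]
    rw [PySem.List.foldl_congr_mem _ _ _ _ hcong]
    have hrec := pvMain mr rest (by simp only [List.length_cons] at h; omega)
      (pvABody (x :: y :: rest) mr st 0)
    rw [PySem.List.len_eq] at hrec
    rw [hrec, pvStepEq mr rest x y st]
    simp [pvPairs, List.append_assoc]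

-- ===== VERDICT (by name: the statement is the Claim_ definition above) =====
theorem process_range_spec : Claim_equal_process_range := by
  intro nr mr _ hpre
  unfold Spec_process_range process_range process_range_alt
  rw [pvMain mr nr hpre.1 ([], [])]
  simp
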